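-- pv_equiv track=rewrite | github.com/tinkilove/ChinaDoublCodeLottery | Auto_doubleballfetch.py | __get_red_pos
-- ===== SOURCE A (Python) =====
-- def __get_red_pos(strCode):
--     lstcode = strCode.split(',')
--     numbers = list(map(int, lstcode))
--     redpos = {'5': 0, '10': 0, '16': 0, '22': 0, '28': 0, '33': 0}
--     for code in numbers:
--         for di in redpos.keys():
--             if code <= int(str(di)):
--                 redpos[di] = redpos[di] + 1
--                 break
--     return redpos
-- ===== SOURCE B (Python) =====
-- def __get_red_pos(strCode):
--     codes = [int(p) for p in strCode.split(',')]
--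
--     def cnt(b):
--         return sum(1 for c in codes if c <= b)
--
--     return {
--         '5': cnt(5),
--         '10': cnt(10) - cnt(5),
--         '16': cnt(16) - cnt(10),
--         '22': cnt(22) - cnt(16),
--         '28': cnt(28) - cnt(22),
--         '33': cnt(33) - cnt(28),
--     }
-- ===== Notes on version B (the rewrite author's own statement) =====
-- stated objective: alternative
-- what changed: Replaces the per-code scan over the six dict keys with a break, by six cumulative threshold counts: each bucket is cnt(hi) - cnt(lo), where cnt(b) counts codes <= b, so no per-element bucket dispatch or break remains.
import Mathlib
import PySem

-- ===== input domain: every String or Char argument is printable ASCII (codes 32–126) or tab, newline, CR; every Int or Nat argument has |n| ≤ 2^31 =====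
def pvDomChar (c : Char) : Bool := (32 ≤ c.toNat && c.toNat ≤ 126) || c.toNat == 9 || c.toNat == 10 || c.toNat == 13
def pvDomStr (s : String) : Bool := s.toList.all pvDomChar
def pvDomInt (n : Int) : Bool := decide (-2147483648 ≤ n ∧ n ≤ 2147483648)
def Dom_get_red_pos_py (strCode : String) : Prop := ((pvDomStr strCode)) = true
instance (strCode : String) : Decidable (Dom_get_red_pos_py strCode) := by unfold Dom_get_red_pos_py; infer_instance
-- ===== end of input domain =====

-- B replaces A's per-code scan over the six dict keys (with break) by six cumulative
-- threshold counts (each bucket = cnt(hi) - cnt(lo)); alternative structure, same values.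

-- ===== PORT A =====
-- the inner loop 'for di in redpos.keys(): if code <= int(str(di)): redpos[di] += 1; break'
-- (int(str(di)) on the six numeric-literal keys never raises, so its total form .getD 0 is exact there)
def pvInnerA (d : PySem.Dict String Int) (code : Int) : List String → PySem.Dict String Int
  | [] => d
  | di :: rest =>
    if code ≤ (PySem.Int.ofStr? di).getD 0 then d.insert di (d.getD di 0 + 1)
    else pvInnerA d code rest

def get_red_pos_py (strCode : String) : List (String × Int) :=
  let lstcode := (PySem.Str.split? strCode ",").getD []  -- sep "," ≠ "", so split never raises
  let numbers := lstcode.map (fun s => (PySem.Int.ofStr? s).getD 0)  -- Pre_ makes every int() succeed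
  let redpos0 : PySem.Dict String Int :=
    PySem.Dict.ofList [("5", 0), ("10", 0), ("16", 0), ("22", 0), ("28", 0), ("33", 0)]
  let final := numbers.foldl (fun d code => pvInnerA d code d.keys) redpos0
  final.items

-- ===== PORT B =====
-- cnt(b) = sum(1 for c in codes if c <= b)
def pvCnt (codes : List Int) (b : Int) : Int := ((codes.countP (fun c => decide (c ≤ b)) : Nat) : Int)

def get_red_pos_py_alt (strCode : String) : List (String × Int) :=
  let codes := ((PySem.Str.split? strCode ",").getD []).map (fun s => (PySem.Int.ofStr? s).getD 0)
  [("5", pvCnt codes 5),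
   ("10", pvCnt codes 10 - pvCnt codes 5),
   ("16", pvCnt codes 16 - pvCnt codes 10),
   ("22", pvCnt codes 22 - pvCnt codes 16),
   ("28", pvCnt codes 28 - pvCnt codes 22),
   ("33", pvCnt codes 33 - pvCnt codes 28)]

-- ===== PRECONDITION & SPEC =====
-- exactly the inputs where every comma-separated piece parses as a Python int (else int() raises ValueError)
def Pre_get_red_pos_py (strCode : String) : Prop :=
  ∀ p ∈ (PySem.Str.split? strCode ",").getD [], (PySem.Int.ofStr? p).isSome = true
instance (strCode : String) : Decidable (Pre_get_red_pos_py strCode) := by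
  unfold Pre_get_red_pos_py; infer_instance

def pvWitness_get_red_pos_py : String := "1,6, 33 ,-4"

def Spec_get_red_pos_py (strCode : String) (out : List (String × Int)) : Prop := out = get_red_pos_py_alt strCode
instance (strCode : String) (out : List (String × Int)) : Decidable (Spec_get_red_pos_py strCode out) := by unfold Spec_get_red_pos_py; infer_instance

-- ===== CLAIM (what is proved, stated in full; the proofs are below) =====
def Claim_equal_get_red_pos_py : Prop := ∀ (strCode : String), Dom_get_red_pos_py strCode → Pre_get_red_pos_py strCode → Spec_get_red_pos_py strCode (get_red_pos_py strCode)

-- ===== LEMMAS AND PROOFS =====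

-- one step of A's loop on the six-key dict bumps exactly the first bucket whose bound covers x
theorem pv_stepA (x a b c d e f : Int) :
    pvInnerA (PySem.Dict.mk [("5", a), ("10", b), ("16", c), ("22", d), ("28", e), ("33", f)]) x
        (PySem.Dict.mk [("5", a), ("10", b), ("16", c), ("22", d), ("28", e), ("33", f)]).keys =
      PySem.Dict.mk [("5", a + if x ≤ 5 then 1 else 0),
        ("10", b + if ¬ x ≤ 5 ∧ x ≤ 10 then 1 else 0),
        ("16", c + if ¬ x ≤ 10 ∧ x ≤ 16 then 1 else 0),
        ("22", d + if ¬ x ≤ 16 ∧ x ≤ 22 then 1 else 0),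
        ("28", e + if ¬ x ≤ 22 ∧ x ≤ 28 then 1 else 0),
        ("33", f + if ¬ x ≤ 28 ∧ x ≤ 33 then 1 else 0)] := by
  have e5 : (PySem.Int.ofStr? "5").getD 0 = 5 := by decide
  have e10 : (PySem.Int.ofStr? "10").getD 0 = 10 := by decide
  have e16 : (PySem.Int.ofStr? "16").getD 0 = 16 := by decide
  have e22 : (PySem.Int.ofStr? "22").getD 0 = 22 := by decide
  have e28 : (PySem.Int.ofStr? "28").getD 0 = 28 := by decide
  have e33 : (PySem.Int.ofStr? "33").getD 0 = 33 := by decide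
  rw [PySem.Dict.keys_mk]
  simp only [List.map_cons, List.map_nil]
  simp only [pvInnerA, e5, e10, e16, e22, e28, e33]
  split_ifs with h1 h2 h3 h4 h5 h6 <;>
    first
      | (exfalso; omega)
      | (apply PySem.Dict.ext
         simp [PySem.Dict.insert, PySem.Dict.contains, PySem.Dict.getD, PySem.Dict.get?])

theorem pvCnt_cons (x : Int) (xs : List Int) (b : Int) :
    pvCnt (x :: xs) b = pvCnt xs b + if x ≤ b then 1 else 0 := by
  simp [pvCnt, List.countP_cons]

-- the loop invariant: folding A's per-code step over any code list, starting from the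
-- six-key dict with arbitrary counters, lands at B's cumulative-count values
theorem pv_fold_items (codes : List Int) (a b c d e f : Int) :
    (codes.foldl (fun d code => pvInnerA d code d.keys)
        (PySem.Dict.mk [("5", a), ("10", b), ("16", c), ("22", d), ("28", e), ("33", f)])).items =
      [("5", a + pvCnt codes 5),
       ("10", b + (pvCnt codes 10 - pvCnt codes 5)),
       ("16", c + (pvCnt codes 16 - pvCnt codes 10)),
       ("22", d + (pvCnt codes 22 - pvCnt codes 16)),
       ("28", e + (pvCnt codes 28 - pvCnt codes 22)),
       ("33", f + (pvCnt codes 33 - pvCnt codes 28))] := by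
  induction codes generalizing a b c d e f with
  | nil => simp [pvCnt]
  | cons x xs ih =>
    rw [List.foldl_cons, pv_stepA, ih]
    simp only [pvCnt_cons, List.cons.injEq, Prod.mk.injEq, and_true, true_and]
    refine ⟨by split_ifs <;> omega, by split_ifs <;> omega, by split_ifs <;> omega,
      by split_ifs <;> omega, by split_ifs <;> omega, by split_ifs <;> omega⟩

theorem pv_ofList_mk :
    (PySem.Dict.ofList [("5", (0:Int)), ("10", 0), ("16", 0), ("22", 0), ("28", 0), ("33", 0)]) =
      PySem.Dict.mk [("5", 0), ("10", 0), ("16", 0), ("22", 0), ("28", 0), ("33", 0)] := by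
  decide

-- ===== VERDICT (by name: the statement is the Claim_ definition above) =====
theorem get_red_pos_py_spec : Claim_equal_get_red_pos_py := by
  intro strCode _ _
  show get_red_pos_py strCode = get_red_pos_py_alt strCode
  unfold get_red_pos_py get_red_pos_py_alt
  rw [pv_ofList_mk, pv_fold_items]
  simp
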